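-- pv_equiv track=rewrite | github.com/ABCwewe/astrbot_plugin_GPT_SoVITS-multi-speaker | generate_speakers_config.py | extract_speaker_name
-- ===== SOURCE A (Python) =====
-- def extract_speaker_name(dir_name: str) -> str:
--     """从目录名提取说话人名称"""
--     # 移除语言后缀，如 _ZH, _EN 等
--     name = dir_name
--     suffixes = ["_zh", "_en", "_ja", "_ko", "_ZH", "_EN", "_JA", "_KO"]
--     for suffix in suffixes:
--         if name.lower().endswith(suffix):
--             name = name[: -len(suffix)]
--             break
--     return name
-- ===== SOURCE B (Python) =====
-- def extract_speaker_name(dir_name: str) -> str: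
--     """从目录名提取说话人名称"""
--     # All language suffixes are 3 chars: look at the last 3 chars once.
--     if dir_name[-3:].lower() in ("_zh", "_en", "_ja", "_ko"):
--         return dir_name[:-3]
--     return dir_name
-- ===== Notes on version B (the rewrite author's own statement) =====
-- stated objective: simpler
-- what changed: B drops A's loop over eight candidate suffixes (lower-casing the whole string for each endswith test) and instead lower-cases only the last three characters once and tests membership in the four real suffixes, returning dir_name[:-3] on a hit.
import Mathlib
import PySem

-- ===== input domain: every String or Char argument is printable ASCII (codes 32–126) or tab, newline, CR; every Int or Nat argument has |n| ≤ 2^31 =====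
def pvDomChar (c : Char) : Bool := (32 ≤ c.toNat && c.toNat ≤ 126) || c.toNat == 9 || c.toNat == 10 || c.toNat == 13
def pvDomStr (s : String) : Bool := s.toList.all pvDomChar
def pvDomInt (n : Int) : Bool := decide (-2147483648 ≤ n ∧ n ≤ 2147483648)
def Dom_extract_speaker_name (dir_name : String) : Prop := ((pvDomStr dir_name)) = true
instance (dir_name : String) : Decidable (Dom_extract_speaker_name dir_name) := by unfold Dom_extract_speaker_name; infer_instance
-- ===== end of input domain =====

-- B replaces A's loop over eight candidate suffixes (each lower-casing the whole string) by
-- one lower-cased 3-character tail and a membership test: simpler, same values everywhere.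

-- ===== PORT A =====
-- the suffix list A iterates over
def pySuffixes : List String := ["_zh", "_en", "_ja", "_ko", "_ZH", "_EN", "_JA", "_KO"]

-- 'for suffix in suffixes: if name.lower().endswith(suffix): name = name[:-len(suffix)]; break'
def extractLoop (name : String) : List String → String
  | [] => name
  | suffix :: rest =>
    if PySem.Str.endswith (PySem.Str.lower name) suffix then
      PySem.Str.slice name none (some (-(PySem.Str.len suffix)))
    else extractLoop name rest

def extract_speaker_name (dir_name : String) : String :=
  extractLoop dir_name pySuffixes

-- ===== PORT B =====
def extract_speaker_name_alt (dir_name : String) : String :=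
  let tail := PySem.Str.lower (PySem.Str.slice dir_name (some (-3)) none)
  if tail = "_zh" ∨ tail = "_en" ∨ tail = "_ja" ∨ tail = "_ko" then
    PySem.Str.slice dir_name none (some (-3))
  else dir_name

-- ===== PRECONDITION & SPEC =====
def Spec_extract_speaker_name (dir_name : String) (out : String) : Prop := out = extract_speaker_name_alt dir_name
instance (dir_name : String) (out : String) : Decidable (Spec_extract_speaker_name dir_name out) := by unfold Spec_extract_speaker_name; infer_instance

-- ===== CLAIM (what is proved, stated in full; the proofs are below) =====
def Claim_equal_extract_speaker_name : Prop := ∀ (dir_name : String), Dom_extract_speaker_name dir_name → Spec_extract_speaker_name dir_name (extract_speaker_name dir_name)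

-- ===== LEMMAS AND PROOFS =====

-- lower-casing never produces an ASCII uppercase letter
theorem lowerChar_not_isupper (c : Char) : PySem.Chars.isupper (PySem.Chars.lowerChar c) = false := by
  unfold PySem.Chars.lowerChar
  split
  · rename_i h
    have hA : 'A' ≤ c ∧ c ≤ 'Z' := by simpa [PySem.Chars.isupper] using h
    have hhi : c.toNat ≤ 90 := by
      have h1 := UInt32.le_iff_toNat_le.mp (Char.le_def.mp hA.2)
      have h2 : ('Z').val.toNat = 90 := by decide
      rw [h2] at h1; exact h1
    have hlo : 65 ≤ c.toNat := by
      have h1 := UInt32.le_iff_toNat_le.mp (Char.le_def.mp hA.1)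
      have h2 : ('A').val.toNat = 65 := by decide
      rw [h2] at h1; exact h1
    have hv : (c.toNat + 32).isValidChar := Or.inl (by omega)
    have ht : (Char.ofNat (c.toNat + 32)).toNat = c.toNat + 32 := by
      rw [Char.toNat_ofNat, if_pos hv]
    have hd : ¬ (Char.ofNat (c.toNat + 32) ≤ 'Z') := by
      intro hle
      have h1 := UInt32.le_iff_toNat_le.mp (Char.le_def.mp hle)
      have h2 : ('Z').val.toNat = 90 := by decide
      rw [h2] at h1
      have h3 : (Char.ofNat (c.toNat + 32)).toNat ≤ 90 := h1
      omega
    unfold PySem.Chars.isupper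
    rw [decide_eq_false hd, Bool.and_false]
  · rename_i h
    simpa [PySem.Chars.isupper] using h

-- a suffix containing an uppercase letter never matches a lower-cased string
theorem endswith_upper_false (s p : String) (c : Char) (hc : c ∈ p.toList)
    (hu : PySem.Chars.isupper c = true) :
    PySem.Str.endswith (PySem.Str.lower s) p = false := by
  rw [PySem.Str.endswith_eq, PySem.Str.toList_lower]
  apply Bool.eq_false_iff.mpr
  intro htrue
  have hsuf := (PySem.Chars.endswith_iff _ _).mp htrue
  have hmem : c ∈ PySem.Chars.lower s.toList := hsuf.subset hc
  unfold PySem.Chars.lower at hmem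
  obtain ⟨d, _, hd⟩ := List.mem_map.mp hmem
  rw [← hd, lowerChar_not_isupper] at hu
  exact Bool.false_ne_true hu

-- a 3-character suffix test is a test on the dropped tail
theorem suffix3_iff (p m : List Char) (hp : p.length = 3) :
    (p <:+ m) ↔ m.drop (m.length - 3) = p := by
  rw [List.suffix_iff_eq_drop, hp, eq_comm]

-- endswith on the lower-cased string, for a 3-char pattern, is a test on the lower-cased 3-char tail
theorem endswith_lower3 (s p : String) (hp : p.toList.length = 3) :
    PySem.Str.endswith (PySem.Str.lower s) p = true ↔
      (PySem.Chars.lower s.toList).drop (s.toList.length - 3) = p.toList := by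
  rw [PySem.Str.endswith_eq, PySem.Str.toList_lower, PySem.Chars.endswith_iff,
    suffix3_iff _ _ hp]
  unfold PySem.Chars.lower
  rw [List.length_map]

-- B's tail, on the list side
theorem tail_toList (s : String) :
    (PySem.Str.lower (PySem.Str.slice s (some (-3)) none)).toList
      = (PySem.Chars.lower s.toList).drop (s.toList.length - 3) := by
  rw [PySem.Str.toList_lower]
  unfold PySem.Str.slice
  rw [String.toList_ofList, PySem.Chars.slice_eq_listSlice,
    PySem.List.slice_from_neg_ofNat _ 3 (by omega)]
  unfold PySem.Chars.lower
  rw [List.map_drop]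

theorem main_eq (s : String) :
    extract_speaker_name s = extract_speaker_name_alt s := by
  unfold extract_speaker_name extract_speaker_name_alt pySuffixes
  simp only [extractLoop]
  have hz := endswith_lower3 s "_zh" (by decide)
  have he := endswith_lower3 s "_en" (by decide)
  have hj := endswith_lower3 s "_ja" (by decide)
  have hk := endswith_lower3 s "_ko" (by decide)
  have hZ := endswith_upper_false s "_ZH" 'Z' (by decide) (by decide)
  have hE := endswith_upper_false s "_EN" 'E' (by decide) (by decide)
  have hJ := endswith_upper_false s "_JA" 'J' (by decide) (by decide)
  have hK := endswith_upper_false s "_KO" 'K' (by decide) (by decide)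
  have htl := tail_toList s
  have hb : ∀ p : String, (PySem.Str.lower (PySem.Str.slice s (some (-3)) none) = p)
      ↔ (PySem.Chars.lower s.toList).drop (s.toList.length - 3) = p.toList := by
    intro p; rw [← String.toList_inj, htl]
  simp only [hZ, hE, hJ, hK, Bool.false_eq_true, if_false,
    show PySem.Str.len "_zh" = 3 from by decide, show PySem.Str.len "_en" = 3 from by decide,
    show PySem.Str.len "_ja" = 3 from by decide, show PySem.Str.len "_ko" = 3 from by decide]
  by_cases h1 : (PySem.Chars.lower s.toList).drop (s.toList.length - 3) = "_zh".toList
  · rw [if_pos (hz.mpr h1), if_pos (Or.inl ((hb "_zh").mpr h1))]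
  · rw [if_neg (fun hc => h1 (hz.mp hc))]
    by_cases h2 : (PySem.Chars.lower s.toList).drop (s.toList.length - 3) = "_en".toList
    · rw [if_pos (he.mpr h2), if_pos (Or.inr (Or.inl ((hb "_en").mpr h2)))]
    · rw [if_neg (fun hc => h2 (he.mp hc))]
      by_cases h3 : (PySem.Chars.lower s.toList).drop (s.toList.length - 3) = "_ja".toList
      · rw [if_pos (hj.mpr h3), if_pos (Or.inr (Or.inr (Or.inl ((hb "_ja").mpr h3))))]
      · rw [if_neg (fun hc => h3 (hj.mp hc))]
        by_cases h4 : (PySem.Chars.lower s.toList).drop (s.toList.length - 3) = "_ko".toList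
        · rw [if_pos (hk.mpr h4), if_pos (Or.inr (Or.inr (Or.inr ((hb "_ko").mpr h4))))]
        · rw [if_neg (fun hc => h4 (hk.mp hc))]
          rw [if_neg]
          rintro (hc | hc | hc | hc)
          · exact h1 ((hb "_zh").mp hc)
          · exact h2 ((hb "_en").mp hc)
          · exact h3 ((hb "_ja").mp hc)
          · exact h4 ((hb "_ko").mp hc)

-- ===== VERDICT (by name: the statement is the Claim_ definition above) =====
theorem extract_speaker_name_spec : Claim_equal_extract_speaker_name := by
  intro dir_name _
  unfold Spec_extract_speaker_name
  exact main_eq dir_name
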